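-- pv_equiv track=rewrite | github.com/puntersloveit/puntersloveit.github.io | scripts/functions.py | count_score_changes
-- ===== SOURCE A (Python) =====
-- def count_score_changes(compared_scores: list) -> int:
--     """
--     Count the number of score changes in a list of compared scores.
--
--     Args:
--         compared_scores (list): List of scores to compare, where -1 means its a tie, 1 - home team leads, 0 - away team leads
--
--     Returns:
--         int: Number of score changes.
--     """
--     count = 0
--     prev = None
--
--     for num in compared_scores:
--         # If it's the first score and it's -1, skip it
--         if prev is None and num == -1:
--             pass
--         # If it's the first score and it's not -1, count it as a change
--         elif prev is None and num != -1:
--             count += 1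
--         # If it's not the first score and it's different from the previous score, count it as a change
--         elif prev is not None and num != prev:
--             count += 1
--         prev = num
--
--     return count
-- ===== SOURCE B (Python) =====
-- def count_score_changes(compared_scores: list) -> int:
--     # Count maximal runs of equal consecutive values, then subtract one
--     # if the list starts with a -1 run (a leading tie is not a change).
--     n = len(compared_scores)
--     runs = 0
--     i = 0
--     while i < n:
--         j = i + 1
--         while j < n and compared_scores[j] == compared_scores[i]:
--             j += 1
--         runs += 1
--         i = j
--     if compared_scores and compared_scores[0] == -1:
--         runs -= 1
--     return runs
-- ===== Notes on version B (the rewrite author's own statement) =====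
-- stated objective: alternative
-- what changed: Instead of A's per-element state machine (prev=None plus three branches), B counts maximal runs of equal consecutive values by skipping each whole run with an inner loop, then subtracts one when the list starts with a -1 run; changes = runs minus the non-counted leading tie-run.
import Mathlib
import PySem

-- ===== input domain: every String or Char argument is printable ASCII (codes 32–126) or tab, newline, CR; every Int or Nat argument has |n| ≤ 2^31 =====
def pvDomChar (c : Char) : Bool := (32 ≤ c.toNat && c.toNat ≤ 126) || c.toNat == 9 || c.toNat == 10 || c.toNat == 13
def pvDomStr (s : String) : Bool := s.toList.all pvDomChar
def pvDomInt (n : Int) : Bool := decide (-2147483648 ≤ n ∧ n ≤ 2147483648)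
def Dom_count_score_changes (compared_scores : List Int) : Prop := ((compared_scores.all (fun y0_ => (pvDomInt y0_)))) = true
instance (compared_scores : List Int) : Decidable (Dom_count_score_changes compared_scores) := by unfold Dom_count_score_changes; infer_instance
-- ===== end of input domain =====

-- B counts maximal runs (skipping each run whole) and subtracts one for a leading -1 run,
-- instead of A's per-element state machine; an alternative decomposition of the same count.

-- ===== PORT A =====
-- state: (count, prev); branch order as in the Python
def count_score_changes (compared_scores : List Int) : Int :=
  (compared_scores.foldl
    (fun (s : Int × Option Int) num =>
      let count := s.1
      let prev := s.2
      let count' :=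
        if prev = none ∧ num = -1 then count
        else if prev = none ∧ num ≠ -1 then count + 1
        else if prev ≠ none ∧ some num ≠ prev then count + 1
        else count
      (count', some num))
    (0, none)).1

-- ===== PORT B =====
-- the outer while loop of Source B: each step consumes one maximal run
-- (the inner `while j < n and xs[j] == xs[i]` is the dropWhile over the rest of the run)
def cscRuns : List Int → Int
  | [] => 0
  | x :: xs => 1 + cscRuns (xs.dropWhile (· == x))
termination_by xs => xs.length
decreasing_by
  exact Nat.lt_succ_of_le (xs.length_dropWhile_le (· == x))

def count_score_changes_alt (compared_scores : List Int) : Int :=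
  let runs := cscRuns compared_scores
  match compared_scores with
  | [] => runs
  | y :: _ => if y = -1 then runs - 1 else runs

-- ===== PRECONDITION & SPEC =====
def Spec_count_score_changes (compared_scores : List Int) (out : Int) : Prop := out = count_score_changes_alt compared_scores
instance (compared_scores : List Int) (out : Int) : Decidable (Spec_count_score_changes compared_scores out) := by unfold Spec_count_score_changes; infer_instance

-- ===== CLAIM (what is proved, stated in full; the proofs are below) =====
def Claim_equal_count_score_changes : Prop := ∀ (compared_scores : List Int), Dom_count_score_changes compared_scores → Spec_count_score_changes compared_scores (count_score_changes compared_scores)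

-- ===== LEMMAS AND PROOFS =====

-- loop invariant: from state (c, some p), A's fold adds (number of runs of p::xs) - 1
theorem csc_foldl_some (xs : List Int) (c p : Int) :
    (xs.foldl
      (fun (s : Int × Option Int) num =>
        let count := s.1
        let prev := s.2
        let count' :=
          if prev = none ∧ num = -1 then count
          else if prev = none ∧ num ≠ -1 then count + 1
          else if prev ≠ none ∧ some num ≠ prev then count + 1
          else count
        (count', some num))
      (c, some p)).1
    = c + cscRuns (p :: xs) - 1 := by
  induction xs generalizing c p with
  | nil => simp [cscRuns]
  | cons y ys ih =>
    by_cases h : y = p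
    · subst h
      have step := ih c y
      simp only [List.foldl_cons] at *
      simp only [cscRuns, List.dropWhile_cons] at *
      simpa using step
    · have step := ih (c + 1) y
      simp only [List.foldl_cons, cscRuns] at step ⊢
      have hdw : (y :: ys).dropWhile (· == p) = y :: ys := by simp [h]
      rw [hdw]
      simp only [cscRuns]
      simp [h] at step ⊢
      omega

-- ===== VERDICT (by name: the statement is the Claim_ definition above) =====
theorem count_score_changes_spec : Claim_equal_count_score_changes := by
  intro xs _
  unfold Spec_count_score_changes count_score_changes count_score_changes_alt
  cases xs with
  | nil => simp [cscRuns]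
  | cons y ys =>
    simp only [List.foldl_cons]
    by_cases h : y = -1
    · subst h
      have step := csc_foldl_some ys 0 (-1)
      simpa using step
    · have step := csc_foldl_some ys 1 y
      simp [h, Ne.symm h] at step ⊢
      omega
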